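-- pv_equiv track=rewrite | github.com/ProjectMI/MBCdecompiler | mbl_vm_tools/hir.py | _immediate_postdom
-- ===== SOURCE A (Python) =====
-- from typing import Any, Optional
--
-- def _immediate_postdom(block_id: str, postdom: dict[str, set[str]], index_by_id: dict[str, int]) -> Optional[str]:
--     candidates = list(postdom.get(block_id, set()) - {block_id})
--     if not candidates:
--         return None
--     candidates.sort(key=lambda item: index_by_id.get(item, 10 ** 6))
--     for candidate in candidates:
--         if all(candidate not in postdom.get(other, set()) for other in candidates if other != candidate):
--             return candidate
--     return candidates[0]
-- ===== SOURCE B (Python) =====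
-- def _immediate_postdom(block_id, postdom, index_by_id):
--     candidates = postdom.get(block_id, set()) - {block_id}
--     if not candidates:
--         return None
--     dominated = {x for other in candidates for x in postdom.get(other, set())
--                  if x in candidates and x != other}
--     pool = [c for c in candidates if c not in dominated] or list(candidates)
--     return min(pool, key=lambda c: index_by_id.get(c, 10 ** 6))
-- ===== Notes on version B (the rewrite author's own statement) =====
-- stated objective: alternative
-- what changed: B replaces A's sort-then-rescan (for each sorted candidate an all(...) scan over every other candidate's postdom set, with a sorted[0] fallback) by building one 'dominated' set, filtering the candidates through it, and taking the key-minimum of the resulting pool (or of all candidates if the pool is empty) with a single min() call and no sort.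
-- outside the precondition, e.g. on _immediate_postdom('a', {'a': {'c', 'b'}, 'b': {'c'}}, {}): A returns 'b', B returns 'b'
import Mathlib
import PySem

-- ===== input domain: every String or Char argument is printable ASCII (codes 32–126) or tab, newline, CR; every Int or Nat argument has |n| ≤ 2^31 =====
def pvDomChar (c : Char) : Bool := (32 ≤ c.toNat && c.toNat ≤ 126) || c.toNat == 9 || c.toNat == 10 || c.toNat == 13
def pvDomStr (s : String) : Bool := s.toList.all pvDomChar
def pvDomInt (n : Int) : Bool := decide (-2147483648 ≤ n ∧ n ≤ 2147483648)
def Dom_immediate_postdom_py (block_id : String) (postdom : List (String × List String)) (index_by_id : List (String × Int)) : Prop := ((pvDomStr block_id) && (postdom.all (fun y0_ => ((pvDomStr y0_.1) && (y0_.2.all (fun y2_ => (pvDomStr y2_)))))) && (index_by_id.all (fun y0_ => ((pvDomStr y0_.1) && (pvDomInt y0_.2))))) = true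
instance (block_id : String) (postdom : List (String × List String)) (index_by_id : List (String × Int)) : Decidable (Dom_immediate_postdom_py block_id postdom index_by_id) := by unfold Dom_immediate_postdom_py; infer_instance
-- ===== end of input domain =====

-- B drops A's sort-then-rescan loop entirely: it builds one 'dominated' set, filters the
-- candidates by it, and takes the key-minimum of the resulting pool (alternative decomposition).

-- ===== PORT A =====
def immediate_postdom_py (block_id : String) (postdom : List (String × List String)) (index_by_id : List (String × Int)) : Option String :=
  let candidates : List String :=
    PySem.Set.diff (PySem.Dict.getD (PySem.Dict.mk postdom) block_id PySem.Set.empty) [block_id]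
  if candidates = [] then none
  else
    let sortedC := PySem.List.sorted candidates
      (fun item => PySem.Dict.getD (PySem.Dict.mk index_by_id) item 1000000) false
    match sortedC.find? (fun candidate =>
        sortedC.all (fun other =>
          if other == candidate then true
          else !(PySem.Set.contains (PySem.Dict.getD (PySem.Dict.mk postdom) other PySem.Set.empty) candidate))) with
    | some c => some c
    | none => PySem.List.pyGet? sortedC 0

-- ===== PORT B =====
def immediate_postdom_py_alt (block_id : String) (postdom : List (String × List String)) (index_by_id : List (String × Int)) : Option String :=
  let candidates : List String :=
    PySem.Set.diff (PySem.Dict.getD (PySem.Dict.mk postdom) block_id PySem.Set.empty) [block_id]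
  if candidates = [] then none
  else
    let dominated : PySem.Set String :=
      candidates.foldl (fun acc other =>
        (PySem.Dict.getD (PySem.Dict.mk postdom) other PySem.Set.empty).foldl
          (fun acc x => if candidates.contains x && x != other then PySem.Set.add acc x else acc)
          acc) PySem.Set.empty
    let pool := candidates.filter (fun c => !(PySem.Set.contains dominated c))
    PySem.List.min? (if pool = [] then candidates else pool)
      (fun c => PySem.Dict.getD (PySem.Dict.mk index_by_id) c 1000000)

-- ===== PRECONDITION & SPEC =====
-- Pre_ excludes inputs where two distinct candidates share the same sort key (index_by_id value
-- or the 10^6 default): there Python's list(set) hash iteration order decides sort/min ties, an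
-- accident of hashing that no port can reproduce; it is a defensible-corner (iteration-order) exclusion.
def Pre_immediate_postdom_py (block_id : String) (postdom : List (String × List String)) (index_by_id : List (String × Int)) : Prop :=
  (PySem.Set.diff (PySem.Dict.getD (PySem.Dict.mk postdom) block_id PySem.Set.empty) [block_id]).Pairwise
    (fun a b => PySem.Dict.getD (PySem.Dict.mk index_by_id) a 1000000 ≠ PySem.Dict.getD (PySem.Dict.mk index_by_id) b 1000000)
instance (block_id : String) (postdom : List (String × List String)) (index_by_id : List (String × Int)) : Decidable (Pre_immediate_postdom_py block_id postdom index_by_id) := by unfold Pre_immediate_postdom_py; infer_instance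

def pvWitness_immediate_postdom_py : String × (List (String × List String)) × (List (String × Int)) :=
  ("a", [("a", ["b", "c"])], [("b", 1), ("c", 2)])

def Spec_immediate_postdom_py (block_id : String) (postdom : List (String × List String)) (index_by_id : List (String × Int)) (out : Option String) : Prop := out = immediate_postdom_py_alt block_id postdom index_by_id
instance (block_id : String) (postdom : List (String × List String)) (index_by_id : List (String × Int)) (out : Option String) : Decidable (Spec_immediate_postdom_py block_id postdom index_by_id out) := by unfold Spec_immediate_postdom_py; infer_instance

-- ===== CLAIM (what is proved, stated in full; the proofs are below) =====
def Claim_equal_immediate_postdom_py : Prop := ∀ (block_id : String) (postdom : List (String × List String)) (index_by_id : List (String × Int)), Dom_immediate_postdom_py block_id postdom index_by_id → Pre_immediate_postdom_py block_id postdom index_by_id → Spec_immediate_postdom_py block_id postdom index_by_id (immediate_postdom_py block_id postdom index_by_id)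

-- ===== LEMMAS AND PROOFS =====

theorem pv_find?_eq_head?_filter (p : String → Bool) (l : List String) :
    l.find? p = (l.filter p).head? := by
  induction l with
  | nil => rfl
  | cons a t ih =>
    rw [List.find?_cons, List.filter_cons]
    cases h : p a
    · simpa using ih
    · rfl

theorem pv_pyGet?_zero (a : String) (t : List String) :
    PySem.List.pyGet? (a :: t) 0 = some a := by
  simp [PySem.List.pyGet?, PySem.List.pyIdx?]

-- min with a key that is injective on the members equals the head of any ≤-sorted list with
-- the same membership.
theorem pv_min?_eq_head? (key : String → Int) (l s : List String)
    (hmem : ∀ x, x ∈ l ↔ x ∈ s)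
    (hpair : s.Pairwise (fun a b => key a ≤ key b))
    (hinj : ∀ a ∈ l, ∀ b ∈ l, key a = key b → a = b) :
    PySem.List.min? l key = s.head? := by
  cases s with
  | nil =>
    have hl : l = [] := by
      cases l with
      | nil => rfl
      | cons x xs => exact absurd ((hmem x).mp (by simp)) (by simp)
    rw [hl]; rfl
  | cons h t =>
    have hhl : h ∈ l := (hmem h).mpr (by simp)
    cases hm : PySem.List.min? l key with
    | none =>
      have : l = [] := (PySem.List.min?_eq_none_iff _ _).mp hm
      rw [this] at hhl; exact absurd hhl (by simp)
    | some m =>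
      have hml : m ∈ l := PySem.List.min?_mem hm
      have h1 : key m ≤ key h := PySem.List.min?_isMin hm h hhl
      have h2 : key h ≤ key m := by
        rcases List.mem_cons.mp ((hmem m).mp hml) with rfl | hm'
        · exact le_refl _
        · exact (List.pairwise_cons.mp hpair).1 m hm'
      have : m = h := hinj m hml h hhl (le_antisymm h1 h2)
      simp [this]

theorem pv_find?_congr {α : Type} (l : List α) (p q : α → Bool)
    (h : ∀ x ∈ l, p x = q x) : l.find? p = l.find? q := by
  induction l with
  | nil => rfl
  | cons y t ih =>
    simp only [List.find?_cons]
    rw [h y (by simp)]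
    cases q y with
    | true => rfl
    | false => exact ih (fun x hx => h x (by simp [hx]))

theorem pv_mem_inner_fold (p : String → Bool) (ys : List String) :
    ∀ (acc : PySem.Set String) (z : String),
      z ∈ ys.foldl (fun a x => if p x then PySem.Set.add a x else a) acc ↔
        z ∈ acc ∨ (z ∈ ys ∧ p z = true) := by
  induction ys with
  | nil => simp
  | cons y t ih =>
    intro acc z
    simp only [List.foldl_cons]
    by_cases hp : p y = true
    · rw [if_pos hp, ih]
      simp only [PySem.Set.mem_add, List.mem_cons]
      constructor
      · rintro ((h | rfl) | ⟨h, hz⟩)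
        · exact Or.inl h
        · exact Or.inr ⟨Or.inl rfl, hp⟩
        · exact Or.inr ⟨Or.inr h, hz⟩
      · rintro (h | ⟨(rfl | h), hz⟩)
        · exact Or.inl (Or.inl h)
        · exact Or.inl (Or.inr rfl)
        · exact Or.inr ⟨h, hz⟩
    · rw [if_neg hp, ih]
      simp only [List.mem_cons]
      constructor
      · rintro (h | ⟨h, hz⟩)
        · exact Or.inl h
        · exact Or.inr ⟨Or.inr h, hz⟩
      · rintro (h | ⟨(rfl | h), hz⟩)
        · exact Or.inl h
        · exact absurd hz hp
        · exact Or.inr ⟨h, hz⟩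

theorem pv_mem_excluded (postdom : List (String × List String)) (cands : List String) :
    ∀ (l : List String) (acc : PySem.Set String) (z : String),
      z ∈ l.foldl (fun acc other =>
          (PySem.Dict.getD (PySem.Dict.mk postdom) other PySem.Set.empty).foldl
            (fun acc x => if cands.contains x && x != other then PySem.Set.add acc x else acc)
            acc) acc ↔
        z ∈ acc ∨ ∃ o ∈ l, z ∈ PySem.Dict.getD (PySem.Dict.mk postdom) o PySem.Set.empty ∧
          cands.contains z = true ∧ z ≠ o := by
  intro l
  induction l with
  | nil => simp
  | cons y t ih =>
    intro acc z
    simp only [List.foldl_cons]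
    rw [ih, pv_mem_inner_fold]
    simp only [List.mem_cons, Bool.and_eq_true, bne_iff_ne, ne_eq]
    constructor
    · rintro ((h | ⟨hz, hc, hne⟩) | ⟨o, ho, hzo, hc, hne⟩)
      · exact Or.inl h
      · exact Or.inr ⟨y, Or.inl rfl, hz, hc, hne⟩
      · exact Or.inr ⟨o, Or.inr ho, hzo, hc, hne⟩
    · rintro (h | ⟨o, (rfl | ho), hzo, hc, hne⟩)
      · exact Or.inl (Or.inl h)
      · exact Or.inl (Or.inr ⟨hzo, hc, hne⟩)
      · exact Or.inr ⟨o, ho, hzo, hc, hne⟩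

theorem immediate_postdom_py_eq_alt (block_id : String) (postdom : List (String × List String)) (index_by_id : List (String × Int)) (hpre : Pre_immediate_postdom_py block_id postdom index_by_id) :
    immediate_postdom_py block_id postdom index_by_id = immediate_postdom_py_alt block_id postdom index_by_id := by
  unfold immediate_postdom_py immediate_postdom_py_alt
  set cands : List String :=
    PySem.Set.diff (PySem.Dict.getD (PySem.Dict.mk postdom) block_id PySem.Set.empty) [block_id] with hcands
  by_cases hnil : cands = []
  · simp [hnil]
  · simp only [if_neg hnil]
    set key := fun item => PySem.Dict.getD (PySem.Dict.mk index_by_id) item 1000000 with hkey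
    set sortedC := PySem.List.sorted cands key false with hs
    set E := cands.foldl (fun acc other =>
        (PySem.Dict.getD (PySem.Dict.mk postdom) other PySem.Set.empty).foldl
          (fun acc x => if cands.contains x && x != other then PySem.Set.add acc x else acc)
          acc) PySem.Set.empty with hE
    set p : String → Bool := fun c => !(PySem.Set.contains E c) with hp
    have hmemE : ∀ z, PySem.Set.contains E z = true ↔
        ∃ o ∈ cands, z ∈ PySem.Dict.getD (PySem.Dict.mk postdom) o PySem.Set.empty ∧
          cands.contains z = true ∧ z ≠ o := by
      intro z
      rw [PySem.Set.contains_iff, hE, pv_mem_excluded]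
      simp [PySem.Set.empty]
    -- A's all(...) test equals B's precomputed-set test, on members of sortedC
    have hfind : sortedC.find? (fun candidate =>
        sortedC.all (fun other =>
          if other == candidate then true
          else !(PySem.Set.contains (PySem.Dict.getD (PySem.Dict.mk postdom) other PySem.Set.empty) candidate))) =
      sortedC.find? p := by
      apply pv_find?_congr
      intro c hc
      have hcmem : c ∈ cands := (PySem.List.mem_sorted _ _ _ _).mp hc
      have hAll : (sortedC.all (fun other =>
          if other == c then true
          else !(PySem.Set.contains (PySem.Dict.getD (PySem.Dict.mk postdom) other PySem.Set.empty) c)) = true) ↔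
          ∀ o ∈ cands, o ≠ c → c ∉ PySem.Dict.getD (PySem.Dict.mk postdom) o PySem.Set.empty := by
        simp only [List.all_eq_true]
        constructor
        · intro h o ho hne
          have := h o ((PySem.List.mem_sorted _ _ _ _).mpr ho)
          simp only [beq_iff_eq, if_neg hne] at this
          simpa [PySem.Set.contains_iff] using this
        · intro h o ho
          by_cases he : o = c
          · simp [he]
          · have hni := h o ((PySem.List.mem_sorted _ _ _ _).mp ho) he
            simp only [beq_iff_eq, if_neg he, Bool.not_eq_true']
            rw [Bool.eq_false_iff]
            intro hcon
            exact hni ((PySem.Set.contains_iff _ _).mp hcon)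
      have hEx : (p c = true) ↔
          ∀ o ∈ cands, o ≠ c → c ∉ PySem.Dict.getD (PySem.Dict.mk postdom) o PySem.Set.empty := by
        constructor
        · intro hb o ho hne hmem
          have hb' : (!(PySem.Set.contains E c)) = true := hb
          have hcontains : PySem.Set.contains E c = true :=
            (hmemE c).mpr ⟨o, ho, hmem, by simpa using hcmem, fun e => hne e.symm⟩
          rw [hcontains] at hb'
          simp at hb'
        · intro h
          show (!(PySem.Set.contains E c)) = true
          simp only [Bool.not_eq_true']
          cases hcon : PySem.Set.contains E c with
          | false => rfl
          | true =>
            obtain ⟨o, ho, hmem, -, hne⟩ := (hmemE c).mp hcon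
            exact absurd hmem (h o ho (fun e => hne e.symm))
      have hbool : ∀ (a b : Bool), (a = true ↔ b = true) → a = b := by decide
      exact hbool _ _ (hAll.trans hEx.symm)
    rw [hfind, pv_find?_eq_head?_filter]
    -- key is injective on candidates (Pre_)
    have hinj : ∀ a ∈ cands, ∀ b ∈ cands, key a = key b → a = b := by
      intro a ha b hb hab
      by_contra hne
      exact (hpre.forall (fun x y hxy => hxy.symm) ha hb hne) hab
    have hpair : sortedC.Pairwise (fun a b => key a ≤ key b) := PySem.List.sorted_pairwise _ _
    by_cases hpool : cands.filter p = []
    · -- no free candidate: A falls back to sortedC[0], B takes min over all candidates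
      have hsf : sortedC.filter p = [] := by
        rw [List.filter_eq_nil_iff] at hpool ⊢
        intro x hx
        exact hpool x ((PySem.List.mem_sorted _ _ _ _).mp hx)
      rw [hsf, hpool, if_pos rfl]
      cases hsc : sortedC with
      | nil => exact absurd (((PySem.List.sorted_eq_nil_iff _ _ _).mp hsc)) hnil
      | cons a t =>
        rw [pv_pyGet?_zero]
        have := pv_min?_eq_head? key cands sortedC
          (fun x => (PySem.List.mem_sorted _ _ _ _).symm) hpair hinj
        rw [hsc] at this
        simp [this]
    · -- some free candidate: A returns the first free in sorted order, B the key-min of the pool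
      simp only [if_neg hpool]
      have hmemf : ∀ x, x ∈ cands.filter p ↔ x ∈ sortedC.filter p := by
        intro x
        simp only [List.mem_filter]
        rw [PySem.List.mem_sorted]
      have hres := pv_min?_eq_head? key (cands.filter p) (sortedC.filter p)
        hmemf (hpair.filter p)
        (fun a ha b hb => hinj a (List.mem_of_mem_filter ha) b (List.mem_of_mem_filter hb))
      rw [hres]
      cases hsf : sortedC.filter p with
      | nil =>
        exfalso
        obtain ⟨x, hx⟩ := List.exists_mem_of_ne_nil _ hpool
        have := (hmemf x).mp hx
        rw [hsf] at this
        exact absurd this (by simp)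
      | cons a t => rfl

-- ===== VERDICT (by name: the statement is the Claim_ definition above) =====
theorem immediate_postdom_py_spec : Claim_equal_immediate_postdom_py := by
  intro block_id postdom index_by_id _ hpre
  unfold Spec_immediate_postdom_py
  exact immediate_postdom_py_eq_alt block_id postdom index_by_id hpre
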